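-- pv_equiv track=rewrite | github.com/KHJun99/Algorithm | 백준/Gold/20437. 문자열 게임 2/문자열 게임 2.py | solve
-- ===== SOURCE A (Python) =====
-- def solve(W, K):
--     # 각 문자의 위치를 저장
--     char_positions = {}
--     for i, char in enumerate(W):
--         if char not in char_positions:
--             char_positions[char] = []
--         char_positions[char].append(i)
--
--     min_length = float('inf')
--     max_length = 0
--     found = False
--
--     # 각 문자에 대해 K개씩 묶어서 확인
--     for char in char_positions:
--         positions = char_positions[char]
--         # K개 미만이면 불가능
--         if len(positions) < K:
--             continue
--
--         found = True
--         # i번째부터 (i+K-1)번째까지가 K개를 포함하는 부분 문자열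
--         for i in range(len(positions) - K + 1):
--             start = positions[i]
--             end = positions[i + K - 1]
--             length = end - start + 1
--
--             # 3번 조건: 최소 길이
--             min_length = min(min_length, length)
--             # 4번 조건: 자동으로 같은 문자로 시작/끝
--             max_length = max(max_length, length)
--
--     if not found:
--         return -1, -1
--
--     return min_length, max_length
-- ===== SOURCE B (Python) =====
-- def solve(W, K):
--     # Single left-to-right pass: for each char keep its occurrence list plus a
--     # head pointer (a FIFO window); when the window holds K occurrences, record
--     # the span length and slide the head by one.
--     pos = {}
--     head = {}
--     min_length = None
--     max_length = 0
--     for i, c in enumerate(W):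
--         q = pos.get(c, [])
--         q.append(i)
--         pos[c] = q
--         h = head.get(c, 0)
--         if len(q) - h == K:
--             length = i - q[h] + 1
--             min_length = length if min_length is None else min(min_length, length)
--             max_length = max(max_length, length)
--             head[c] = h + 1
--     if min_length is None:
--         return -1, -1
--     return min_length, max_length
-- ===== Notes on version B (the rewrite author's own statement) =====
-- stated objective: alternative
-- what changed: A first groups all positions per character and then runs a nested window loop over each group; B is a single online left-to-right pass that maintains a sliding K-occurrence window (occurrence list plus head pointer) per character and updates min/max as each window completes.
import Mathlib
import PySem

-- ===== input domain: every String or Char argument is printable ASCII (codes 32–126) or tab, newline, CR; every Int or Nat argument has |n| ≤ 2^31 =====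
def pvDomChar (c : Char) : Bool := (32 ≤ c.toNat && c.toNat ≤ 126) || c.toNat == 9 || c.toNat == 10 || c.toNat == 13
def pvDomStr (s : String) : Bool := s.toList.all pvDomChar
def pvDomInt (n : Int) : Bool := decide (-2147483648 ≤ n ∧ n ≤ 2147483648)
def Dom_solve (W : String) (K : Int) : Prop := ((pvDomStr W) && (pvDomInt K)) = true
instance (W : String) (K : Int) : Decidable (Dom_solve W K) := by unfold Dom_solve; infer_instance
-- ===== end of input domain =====

-- B replaces A's group-then-nested-window scan by a single online pass with a per-character
-- sliding K-occurrence window (objective: alternative decomposition, same asymptotic cost).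

-- ===== PORT A =====
def solve (W : String) (K : Int) : Int × Int :=
  -- char_positions: group the index of every character occurrence, in first-occurrence order
  let cp : PySem.Dict Char (List Int) :=
    (PySem.List.enumerate W.toList).foldl
      (fun d p => d.modify p.2 [] (· ++ [p.1])) PySem.Dict.empty
  -- state: (min_length : none = float('inf'), max_length, found)
  let st :=
    cp.items.foldl
      (fun (st : Option Int × Int × Bool) kv =>
        if ((kv.2.length : Int) < K) then st
        else
          let inner :=
            (PySem.List.pyRange 0 ((kv.2.length : Int) - K + 1) 1).foldl
              (fun (st2 : Option Int × Int) i =>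
                let s := PySem.List.pyGetD kv.2 i 0
                let e := PySem.List.pyGetD kv.2 (i + K - 1) 0
                let length := e - s + 1
                (some (match st2.1 with | none => length | some m => min m length),
                 max st2.2 length))
              (st.1, st.2.1)
          (inner.1, inner.2, true))
      (none, 0, false)
  if st.2.2 = false then (-1, -1) else (st.1.getD 0, st.2.1)

-- ===== PORT B =====
def solve_alt (W : String) (K : Int) : Int × Int :=
  -- state: (pos, head, min_length : none = None, max_length)
  let st :=
    (PySem.List.enumerate W.toList).foldl
      (fun (st : PySem.Dict Char (List Int) × PySem.Dict Char Int × Option Int × Int) p =>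
        let q := st.1.getD p.2 [] ++ [p.1]
        let pos := st.1.insert p.2 q
        let h := st.2.1.getD p.2 0
        if ((q.length : Int) - h = K) then
          let length := p.1 - PySem.List.pyGetD q h 0 + 1
          (pos, st.2.1.insert p.2 (h + 1),
           some (match st.2.2.1 with | none => length | some m => min m length),
           max st.2.2.2 length)
        else (pos, st.2.1, st.2.2.1, st.2.2.2))
      (PySem.Dict.empty, PySem.Dict.empty, none, 0)
  match st.2.2.1 with
  | none => (-1, -1)
  | some m => (m, st.2.2.2)

-- ===== PRECONDITION & SPEC =====
-- Pre_ excludes exactly the inputs where A raises: for every nonempty W with K ≤ 0 the inner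
-- loop evaluates positions[i] past the end of the list and A raises IndexError.
def Pre_solve (W : String) (K : Int) : Prop := W = "" ∨ 1 ≤ K
instance (W : String) (K : Int) : Decidable (Pre_solve W K) := by unfold Pre_solve; infer_instance
def pvWitness_solve : String × Int := ("abcabba", 2)

def Spec_solve (W : String) (K : Int) (out : Int × Int) : Prop := out = solve_alt W K
instance (W : String) (K : Int) (out : Int × Int) : Decidable (Spec_solve W K out) := by unfold Spec_solve; infer_instance

-- ===== CLAIM (what is proved, stated in full; the proofs are below) =====
def Claim_equal_solve : Prop := ∀ (W : String) (K : Int), Dom_solve W K → Pre_solve W K → Spec_solve W K (solve W K)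

-- ===== LEMMAS AND PROOFS =====

-- the positions of character c in l (what A stores in char_positions[c], B in pos[c])
def occF (c : Char) (l : List Char) : List Int :=
  ((PySem.List.enumerate l).filter (fun p => p.2 == c)).map (·.1)

-- the running (min, max) update both programs perform per window length
def gstep (st : Option Int × Int) (x : Int) : Option Int × Int :=
  (some (match st.1 with | none => x | some m => min m x), max st.2 x)

def mm (ws : List Int) (st : Option Int × Int) : Option Int × Int := ws.foldl gstep st

-- the window lengths A's inner loop produces for a positions list q
def wlist (K : Int) (q : List Int) : List Int :=
  if (q.length : Int) < K then []
  else (PySem.List.pyRange 0 ((q.length : Int) - K + 1) 1).map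
    (fun i => PySem.List.pyGetD q (i + K - 1) 0 - PySem.List.pyGetD q i 0 + 1)

-- A's outer-loop step, exactly as in the port
def AstepF (K : Int) (st : Option Int × Int × Bool) (kv : Char × List Int) :
    Option Int × Int × Bool :=
  if ((kv.2.length : Int) < K) then st
  else
    let inner :=
      (PySem.List.pyRange 0 ((kv.2.length : Int) - K + 1) 1).foldl
        (fun (st2 : Option Int × Int) i =>
          let s := PySem.List.pyGetD kv.2 i 0
          let e := PySem.List.pyGetD kv.2 (i + K - 1) 0
          let length := e - s + 1
          (some (match st2.1 with | none => length | some m => min m length),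
           max st2.2 length))
        (st.1, st.2.1)
    (inner.1, inner.2, true)

-- B's step, exactly as in the port
def BstepF (K : Int)
    (st : PySem.Dict Char (List Int) × PySem.Dict Char Int × Option Int × Int)
    (p : Int × Char) :
    PySem.Dict Char (List Int) × PySem.Dict Char Int × Option Int × Int :=
  let q := st.1.getD p.2 [] ++ [p.1]
  let pos := st.1.insert p.2 q
  let h := st.2.1.getD p.2 0
  if ((q.length : Int) - h = K) then
    let length := p.1 - PySem.List.pyGetD q h 0 + 1
    (pos, st.2.1.insert p.2 (h + 1),
     some (match st.2.2.1 with | none => length | some m => min m length),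
     max st.2.2.2 length)
  else (pos, st.2.1, st.2.2.1, st.2.2.2)

-- the length B emits when char c's window completes at the end of prefix p
def lenAt (K : Int) (c : Char) (p : List Char) : Int :=
  PySem.List.pyGetD (occF c p) (((occF c p).length : Int) - 1) 0
    - PySem.List.pyGetD (occF c p) (((occF c p).length : Int) - K) 0 + 1

def emitF (K : Int) (c : Char) (p : List Char) : List Int :=
  if K ≤ ((occF c p).length : Int) then [lenAt K c p] else []

-- the lengths B emits while scanning `rest` after having scanned `pre`
def EBaux (K : Int) (pre : List Char) : List Char → List Int
  | [] => []
  | x :: rest => emitF K x (pre ++ [x]) ++ EBaux K (pre ++ [x]) rest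

def EB (K : Int) (l : List Char) : List Int := EBaux K [] l

theorem occF_append (c x : Char) (l : List Char) :
    occF c (l ++ [x]) = occF c l ++ (if x == c then [(l.length : Int)] else []) := by
  unfold occF
  rw [PySem.List.enumerate_append]
  rw [List.filter_append, List.map_append]
  congr 1
  rcases h : (x == c) <;> simp [PySem.List.enumerate, List.filter, h]

theorem EBaux_snoc (K : Int) (pre m : List Char) (x : Char) :
    EBaux K pre (m ++ [x]) = EBaux K pre m ++ emitF K x ((pre ++ m) ++ [x]) := by
  induction m generalizing pre with
  | nil => simp [EBaux]
  | cons y t ih =>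
    simp only [List.cons_append, EBaux, ih, List.append_assoc]
    simp

theorem EB_snoc (K : Int) (l : List Char) (x : Char) :
    EB K (l ++ [x]) = EB K l ++ emitF K x (l ++ [x]) := by
  have h := EBaux_snoc K [] l x
  simpa [EB] using h

theorem cp_getD (l : List Char) (c : Char) :
    ((PySem.List.enumerate l).foldl (fun d p => d.modify p.2 [] (· ++ [p.1]))
        (PySem.Dict.empty : PySem.Dict Char (List Int))).getD c [] = occF c l := by
  have h := PySem.Dict.getD_foldl_modify_append ((PySem.List.enumerate l).map Prod.swap)
    (PySem.Dict.empty : PySem.Dict Char (List Int)) c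
  rw [List.foldl_map] at h
  simp only [Prod.swap] at h
  rw [h]
  unfold occF
  rw [List.filter_map, List.map_map]
  simp [Function.comp_def, Prod.swap]

theorem cp_keys (l : List Char) :
    ((PySem.List.enumerate l).foldl (fun d p => d.modify p.2 [] (· ++ [p.1]))
        (PySem.Dict.empty : PySem.Dict Char (List Int))).keys = PySem.Set.ofList l := by
  have h := PySem.Dict.keys_foldl_modify_key (PySem.List.enumerate l) (fun p => p.2)
    ([] : List Int) (fun d p => (· ++ [p.1])) PySem.Dict.empty
  rw [h]
  simp [PySem.List.map_snd_enumerate, PySem.Dict.keys_empty]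
  rfl

theorem cp_items (l : List Char) :
    ((PySem.List.enumerate l).foldl (fun d p => d.modify p.2 [] (· ++ [p.1]))
        (PySem.Dict.empty : PySem.Dict Char (List Int))).items
      = (PySem.Set.ofList l).map (fun c => (c, occF c l)) := by
  have hnd : ((PySem.List.enumerate l).foldl (fun d p => d.modify p.2 [] (· ++ [p.1]))
      (PySem.Dict.empty : PySem.Dict Char (List Int))).keys.Nodup :=
    PySem.Dict.nodup_keys_foldl_modify_key (PySem.List.enumerate l)
      (fun (p : Int × Char) => p.2) ([] : List Int)
      (fun d (p : Int × Char) => (· ++ [p.1])) PySem.Dict.empty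
      (by simp [PySem.Dict.keys_empty])
  rw [PySem.Dict.items_eq_map_keys _ hnd ([] : List Int), cp_keys]
  exact List.map_congr_left (fun c _ => by rw [cp_getD])

theorem Astep_eq (K : Int) :
    AstepF K = (fun (st : Option Int × Int × Bool) kv =>
      if ((kv.2.length : Int) < K) then st
      else ((mm (wlist K kv.2) (st.1, st.2.1)).1, (mm (wlist K kv.2) (st.1, st.2.1)).2, true)) := by
  funext st kv
  unfold AstepF wlist
  by_cases h : ((kv.2.length : Int) < K)
  · simp [h]
  · simp only [if_neg h, mm, List.foldl_map]
    rfl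

theorem Afold_eq (K : Int) (cs : List Char) (F : Char → List Int) (st : Option Int × Int × Bool) :
    (cs.map (fun c => (c, F c))).foldl (AstepF K) st
    = ((mm (cs.flatMap (fun c => wlist K (F c))) (st.1, st.2.1)).1,
       (mm (cs.flatMap (fun c => wlist K (F c))) (st.1, st.2.1)).2,
       st.2.2 || cs.any (fun c => !decide (((F c).length : Int) < K))) := by
  rw [Astep_eq]
  induction cs generalizing st with
  | nil => simp [mm]
  | cons c t ih =>
    simp only [List.map_cons, List.foldl_cons, List.flatMap_cons, List.any_cons]
    by_cases h : ((F c).length : Int) < K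
    · rw [if_pos h, ih]
      simp [h, wlist, mm]
    · rw [if_neg h, ih]
      simp only [mm, List.foldl_append]
      simp [h]


theorem pyRange_eq_nil {a b : Int} (h : b ≤ a) : PySem.List.pyRange a b = [] := by
  rcases hr : PySem.List.pyRange a b with _ | ⟨y, t⟩
  · rfl
  · have hy : y ∈ PySem.List.pyRange a b := by rw [hr]; exact List.mem_cons_self
    have := PySem.List.mem_pyRange_one.mp hy
    omega

theorem pyGetD_append_left (q : List Int) (a : Int) {i : Int} (h0 : 0 ≤ i) (h1 : i < q.length) :
    PySem.List.pyGetD (q ++ [a]) i 0 = PySem.List.pyGetD q i 0 := by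
  rw [PySem.List.pyGetD_eq_getElem _ _ h0 (by simp; omega), PySem.List.pyGetD_eq_getElem _ _ h0 h1]
  rw [List.getElem_append_left]

theorem pyGetD_append_last (q : List Int) (a : Int) {i : Int} (hi : i = q.length) :
    PySem.List.pyGetD (q ++ [a]) i 0 = a := by
  subst hi
  rw [PySem.List.pyGetD_natCast]
  simp

theorem occF_nil_of_not_mem {x : Char} {l : List Char} (h : x ∉ l) : occF x l = [] := by
  unfold occF
  rw [List.filter_eq_nil_iff.mpr, List.map_nil]
  intro p hp
  obtain ⟨k, hk, rfl⟩ := (PySem.List.mem_enumerate_iff _ _ _).mp hp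
  intro he
  exact h (by simpa using (beq_iff_eq.mp he) ▸ List.getElem_mem hk)

theorem wlist_snoc (K : Int) (hK : 1 ≤ K) (q : List Int) (a : Int) :
    wlist K (q ++ [a])
      = wlist K q ++
        (if K ≤ (q.length : Int) + 1 then
          [PySem.List.pyGetD (q ++ [a]) ((q.length : Int) + 1 - 1) 0
            - PySem.List.pyGetD (q ++ [a]) ((q.length : Int) + 1 - K) 0 + 1]
         else []) := by
  by_cases hle : K ≤ (q.length : Int) + 1
  · rw [if_pos hle]
    unfold wlist
    rw [if_neg (by simp; omega)]
    have hsplit : ((q ++ [a]).length : Int) - K + 1 = ((q.length : Int) - K + 1) + 1 := by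
      simp; omega
    rw [hsplit, PySem.List.pyRange_one_succ_right (by omega), List.map_append]
    by_cases hq : K ≤ (q.length : Int)
    · rw [if_neg (by omega)]
      congr 1
      · apply List.map_congr_left
        intro i hi
        have := PySem.List.mem_pyRange_one.mp hi
        rw [pyGetD_append_left q a (by omega) (by omega), pyGetD_append_left q a (by omega) (by omega)]
      · simp only [List.map_cons, List.map_nil]
        rw [show (q.length : Int) - K + 1 + K - 1 = (q.length : Int) + 1 - 1 from by omega,
            show (q.length : Int) - K + 1 = (q.length : Int) + 1 - K from by omega]
    · rw [if_pos (by omega)]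
      rw [show (q.length : Int) - K + 1 = K - K from by omega]
      rw [pyRange_eq_nil (by omega)]
      simp only [List.map_cons, List.map_nil, List.nil_append]
      rw [show K - K + K - 1 = (q.length : Int) + 1 - 1 from by omega,
          show K - K = (q.length : Int) + 1 - K from by omega]
  · rw [if_neg hle]
    unfold wlist
    rw [if_pos (by simp; omega), if_pos (by omega), List.append_nil]

theorem flatMap_congr_mem {S : List Char} {f g : Char → List Int}
    (h : ∀ c ∈ S, f c = g c) : S.flatMap f = S.flatMap g := by
  induction S with
  | nil => rfl
  | cons y t ih =>
    simp only [List.flatMap_cons]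
    rw [h y List.mem_cons_self, ih (fun c hc => h c (List.mem_cons_of_mem y hc))]

theorem flatMap_update {S : List Char} {f f' : Char → List Int} {x : Char} {t : List Int}
    (hnd : S.Nodup) (hx : x ∈ S) (hne : ∀ y, y ≠ x → f' y = f y) (hfx : f' x = f x ++ t) :
    (S.flatMap f').Perm (S.flatMap f ++ t) := by
  induction S with
  | nil => cases hx
  | cons y S' ih =>
    rcases List.mem_cons.mp hx with rfl | hx'
    · simp only [List.flatMap_cons]
      have hrest : S'.flatMap f' = S'.flatMap f :=
        flatMap_congr_mem (fun c hc => hne c (fun hcx => (List.nodup_cons.mp hnd).1 (hcx ▸ hc)))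
      rw [hfx, hrest]
      rw [List.append_assoc, List.append_assoc]
      exact List.Perm.append_left _ List.perm_append_comm
    · simp only [List.flatMap_cons]
      have hy : f' y = f y := by
        apply hne
        intro hyx
        exact (List.nodup_cons.mp hnd).1 (hyx ▸ hx')
      rw [hy, List.append_assoc]
      exact List.Perm.append_left _ (ih (List.nodup_cons.mp hnd).2 hx')

theorem Bfold_inv (K : Int) (hK : 1 ≤ K) (l : List Char) :
    (∀ c, ((PySem.List.enumerate l).foldl (BstepF K)
        (PySem.Dict.empty, PySem.Dict.empty, none, 0)).1.getD c [] = occF c l) ∧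
    (∀ c, ((PySem.List.enumerate l).foldl (BstepF K)
        (PySem.Dict.empty, PySem.Dict.empty, none, 0)).2.1.getD c 0
          = max 0 (((occF c l).length : Int) - K + 1)) ∧
    ((PySem.List.enumerate l).foldl (BstepF K)
        (PySem.Dict.empty, PySem.Dict.empty, none, 0)).2.2 = mm (EB K l) (none, 0) := by
  induction l using List.reverseRecOn with
  | nil =>
    refine ⟨fun c => ?_, fun c => ?_, ?_⟩
    · simp [PySem.List.enumerate, occF, PySem.Dict.getD_empty]
    · simp [PySem.List.enumerate, occF, PySem.Dict.getD_empty]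
      omega
    · simp [PySem.List.enumerate, EB, EBaux, mm]
  | append_singleton l x ih =>
    obtain ⟨ih1, ih2, ih3⟩ := ih
    have henum : PySem.List.enumerate (l ++ [x])
        = PySem.List.enumerate l ++ [((l.length : Int), x)] := by
      rw [PySem.List.enumerate_append]; simp [PySem.List.enumerate]
    rw [henum, List.foldl_append]
    set prev := (PySem.List.enumerate l).foldl (BstepF K)
      (PySem.Dict.empty, PySem.Dict.empty, none, 0) with hprev
    have hoccx : occF x (l ++ [x]) = occF x l ++ [(l.length : Int)] := by
      rw [occF_append]; simp
    have hoccne : ∀ c, c ≠ x → occF c (l ++ [x]) = occF c l := by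
      intro c hc
      rw [occF_append, if_neg (by simpa using fun h => hc h.symm), List.append_nil]
    have hq : prev.1.getD x [] ++ [(l.length : Int)] = occF x (l ++ [x]) := by
      rw [ih1, hoccx]
    have hqlen : ((prev.1.getD x [] ++ [(l.length : Int)]).length : Int)
        = ((occF x l).length : Int) + 1 := by
      rw [ih1]; simp
    have hocclen : ((occF x (l ++ [x])).length : Int) = ((occF x l).length : Int) + 1 := by
      rw [hoccx]; simp
    simp only [List.foldl_cons, List.foldl_nil]
    dsimp only [BstepF]
    by_cases hKm : K ≤ ((occF x l).length : Int) + 1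
    · rw [if_pos (by rw [hqlen, ih2]; omega)]
      refine ⟨fun c => ?_, fun c => ?_, ?_⟩
      · rw [PySem.Dict.getD_insert]
        by_cases hc : c = x
        · rw [if_pos hc, hc, hq]
        · rw [if_neg hc, ih1, hoccne c hc]
      · rw [PySem.Dict.getD_insert]
        by_cases hc : c = x
        · rw [if_pos hc, hc, ih2, hocclen]
          omega
        · rw [if_neg hc, ih2, hoccne c hc]
      · have hemit : EB K (l ++ [x]) = EB K l ++ [lenAt K x (l ++ [x])] := by
          rw [EB_snoc]
          unfold emitF
          rw [if_pos (by rw [hocclen]; omega)]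
        rw [hemit]
        have hmm : mm (EB K l ++ [lenAt K x (l ++ [x])]) (none, 0)
            = gstep (mm (EB K l) (none, 0)) (lenAt K x (l ++ [x])) := by
          rw [mm, mm, List.foldl_append]
          rfl
        rw [hmm, ← ih3]
        have hlen : (l.length : Int)
              - PySem.List.pyGetD (prev.1.getD x [] ++ [(l.length : Int)]) (prev.2.1.getD x 0) 0 + 1
            = lenAt K x (l ++ [x]) := by
          unfold lenAt
          rw [← hq, hqlen]
          rw [pyGetD_append_last (prev.1.getD x []) ((l.length : Int))
              (i := ((occF x l).length : Int) + 1 - 1) (by rw [ih1]; omega)]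
          rw [show ((occF x l).length : Int) + 1 - K = prev.2.1.getD x 0 from by rw [ih2]; omega]
        rw [hlen]
        rfl
    · rw [if_neg (by rw [hqlen, ih2]; omega)]
      refine ⟨fun c => ?_, fun c => ?_, ?_⟩
      · rw [PySem.Dict.getD_insert]
        by_cases hc : c = x
        · rw [if_pos hc, hc, hq]
        · rw [if_neg hc, ih1, hoccne c hc]
      · by_cases hc : c = x
        · rw [hc, ih2, hocclen]
          omega
        · rw [ih2, hoccne c hc]
      · have hemit : EB K (l ++ [x]) = EB K l := by
          rw [EB_snoc]
          unfold emitF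
          rw [if_neg (by rw [hocclen]; omega), List.append_nil]
        rw [hemit, ← ih3]

theorem emitF_eq (K : Int) (hK : 1 ≤ K) (l : List Char) (x : Char) :
    wlist K (occF x (l ++ [x])) = wlist K (occF x l) ++ emitF K x (l ++ [x]) := by
  have hocc : occF x (l ++ [x]) = occF x l ++ [(l.length : Int)] := by
    rw [occF_append]; simp
  rw [hocc, wlist_snoc K hK]
  congr 1
  unfold emitF lenAt
  rw [hocc]
  have hlen : ((occF x l ++ [(l.length : Int)]).length : Int) = ((occF x l).length : Int) + 1 := by
    simp
  rw [hlen]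

theorem EB_perm (K : Int) (hK : 1 ≤ K) (l : List Char) :
    (EB K l).Perm ((PySem.Set.ofList l).flatMap (fun c => wlist K (occF c l))) := by
  induction l using List.reverseRecOn with
  | nil => simp [EB, EBaux]
  | append_singleton l x ih =>
    rw [EB_snoc]
    have hne : ∀ c, c ≠ x → wlist K (occF c (l ++ [x])) = wlist K (occF c l) := by
      intro c hc
      rw [occF_append]
      rw [if_neg (by simpa using fun h => hc h.symm), List.append_nil]
    by_cases hx : x ∈ l
    · have hS : PySem.Set.ofList (l ++ [x]) = PySem.Set.ofList l := by
        simp [PySem.Set.ofList_eq_foldl, PySem.Set.add]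
        exact (PySem.Set.mem_ofList l x).mpr hx
      rw [hS]
      refine (ih.append_right _).trans ?_
      exact (flatMap_update (PySem.Set.nodup_ofList l) ((PySem.Set.mem_ofList l x).mpr hx)
        hne (emitF_eq K hK l x)).symm
    · have hS : PySem.Set.ofList (l ++ [x]) = PySem.Set.ofList l ++ [x] := by
        simp [PySem.Set.ofList_eq_foldl, PySem.Set.add]
        intro hc
        exact absurd ((PySem.Set.mem_ofList l x).mp hc) hx
      rw [hS, List.flatMap_append, List.flatMap_singleton]
      have hrest : (PySem.Set.ofList l).flatMap (fun c => wlist K (occF c (l ++ [x])))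
          = (PySem.Set.ofList l).flatMap (fun c => wlist K (occF c l)) := by
        apply flatMap_congr_mem
        intro c hc
        exact hne c (fun h => hx (h ▸ (PySem.Set.mem_ofList l c).mp hc))
      rw [hrest]
      have hx0 : wlist K (occF x (l ++ [x])) = emitF K x (l ++ [x]) := by
        rw [emitF_eq K hK l x, occF_nil_of_not_mem hx]
        unfold wlist
        rw [if_pos (by simpa using hK)]
        simp
      rw [hx0]
      exact ih.append_right _

theorem mm_perm {ws ws' : List Int} (h : ws.Perm ws') (st : Option Int × Int) :
    mm ws st = mm ws' st := by
  haveI : RightCommutative gstep := ⟨by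
    intro st a b
    rcases st with ⟨o, m⟩
    rcases o with _ | v <;> simp [gstep] <;> omega⟩
  exact h.foldl_eq st

theorem mm_fst_none (ws : List Int) (st : Option Int × Int) :
    (ws.foldl gstep st).1 = none ↔ ws = [] ∧ st.1 = none := by
  induction ws generalizing st with
  | nil => simp
  | cons w t ih => simp [ih, gstep]

theorem solve_eq_of_one_le (W : String) (K : Int) (hK : 1 ≤ K) :
    solve W K = solve_alt W K := by
  simp only [solve, solve_alt]
  rw [cp_items]
  rw [show (fun (st : Option Int × Int × Bool) kv =>
        if ((kv.2.length : Int) < K) then st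
        else
          let inner :=
            (PySem.List.pyRange 0 ((kv.2.length : Int) - K + 1) 1).foldl
              (fun (st2 : Option Int × Int) i =>
                let s := PySem.List.pyGetD kv.2 i 0
                let e := PySem.List.pyGetD kv.2 (i + K - 1) 0
                let length := e - s + 1
                (some (match st2.1 with | none => length | some m => min m length),
                 max st2.2 length))
              (st.1, st.2.1)
          (inner.1, inner.2, true)) = AstepF K from rfl]
  rw [show (fun (st : PySem.Dict Char (List Int) × PySem.Dict Char Int × Option Int × Int) p =>
        let q := st.1.getD p.2 [] ++ [p.1]
        let pos := st.1.insert p.2 q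
        let h := st.2.1.getD p.2 0
        if ((q.length : Int) - h = K) then
          let length := p.1 - PySem.List.pyGetD q h 0 + 1
          (pos, st.2.1.insert p.2 (h + 1),
           some (match st.2.2.1 with | none => length | some m => min m length),
           max st.2.2.2 length)
        else (pos, st.2.1, st.2.2.1, st.2.2.2)) = BstepF K from rfl]
  rw [Afold_eq K _ (fun c => occF c W.toList) (none, 0, false)]
  rw [(Bfold_inv K hK W.toList).2.2]
  rw [mm_perm (EB_perm K hK W.toList)]
  dsimp only
  by_cases hany : ((PySem.Set.ofList W.toList).any fun c => !decide (((occF c W.toList).length : Int) < K)) = true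
  · -- some character reaches K occurrences
    rw [hany]
    obtain ⟨c, hc, hP⟩ := List.any_eq_true.mp hany
    have hlen : ¬ ((occF c W.toList).length : Int) < K := by simpa using hP
    have hw : wlist K (occF c W.toList) ≠ [] := by
      unfold wlist
      rw [if_neg hlen]
      have : (0 : Int) < ((occF c W.toList).length : Int) - K + 1 := by omega
      rw [PySem.List.pyRange_one_cons (by omega)]
      simp
    have hAW : (PySem.Set.ofList W.toList).flatMap (fun c => wlist K (occF c W.toList)) ≠ [] := by
      intro hnil
      exact hw (List.flatMap_eq_nil_iff.mp hnil _ hc)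
    rcases ho : (mm ((PySem.Set.ofList W.toList).flatMap (fun c => wlist K (occF c W.toList))) (none, 0)).1 with _ | m
    · exact absurd (((mm_fst_none _ _).mp ho).1) hAW
    · simp
  · -- no character has K occurrences
    rw [Bool.not_eq_true] at hany
    rw [hany]
    have hAW : (PySem.Set.ofList W.toList).flatMap (fun c => wlist K (occF c W.toList)) = [] := by
      apply List.flatMap_eq_nil_iff.mpr
      intro c hc
      have := List.any_eq_false.mp hany c hc
      unfold wlist
      rw [if_pos (by simpa using this)]
    rw [hAW]
    simp [mm]

-- ===== VERDICT (by name: the statement is the Claim_ definition above) =====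
theorem solve_spec : Claim_equal_solve := by
  intro W K _ hpre
  unfold Spec_solve
  rcases hpre with h | h
  · subst h; rfl
  · exact solve_eq_of_one_le W K h
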